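-- pv_equiv track=rewrite | github.com/Tvaughn22/Sentiment-Analysis | src/preprocess.py | _apply_negation
-- ===== SOURCE A (Python) =====
-- from typing import List, Optional
--
-- NEGATIONS = {
--     "not", "no", "never", "neither", "nor",
--     "nobody", "nothing", "nowhere",
--     "hardly", "scarcely", "barely",
--     "cannot",   # from "can't" expansion
-- }
--
-- def _apply_negation(tokens: List[str]) -> List[str]:
--     """
--     Join a negation word with the immediately following content word so that
--     'not good' becomes 'not_good'. Scope resets after one token or at a
--     placeholder boundary (<url> / <user>).
--
--     NOTE — For Word Embedding models: disable this step (handle_negation=False)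
--     because joined tokens like 'not_good' are out-of-vocabulary in GloVe /
--     Word2Vec and receive a zero/unknown vector, losing all semantic meaning.
--     This strategy benefits Bag-of-Words models only.
--     """
--     result: List[str] = []
--     negate_next = False
--     for tok in tokens:
--         if negate_next and tok not in ("<url>", "<user>"):
--             result.append(f"not_{tok}")
--             negate_next = False
--         elif tok in NEGATIONS:
--             result.append(tok)
--             negate_next = True
--         else:
--             result.append(tok)
--             negate_next = False
--     return result
-- ===== SOURCE B (Python) =====
-- from typing import List
--
-- NEGATIONS = {
--     "not", "no", "never", "neither", "nor",
--     "nobody", "nothing", "nowhere",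
--     "hardly", "scarcely", "barely",
--     "cannot",
-- }
--
-- def _apply_negation(tokens: List[str]) -> List[str]:
--     result: List[str] = []
--     i = 0
--     n = len(tokens)
--     while i < n:
--         if tokens[i] in NEGATIONS and i + 1 < n and tokens[i + 1] not in ("<url>", "<user>"):
--             result.append(tokens[i])
--             result.append(f"not_{tokens[i + 1]}")
--             i += 2
--         else:
--             result.append(tokens[i])
--             i += 1
--     return result
-- ===== Notes on version B (the rewrite author's own statement) =====
-- stated objective: alternative
-- what changed: Replaced the carried negate_next boolean threaded across iterations with an index loop that consumes a negation and its following token as a pair via lookahead (i+1 bound and placeholder checks), with no state between iterations.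
import Mathlib
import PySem

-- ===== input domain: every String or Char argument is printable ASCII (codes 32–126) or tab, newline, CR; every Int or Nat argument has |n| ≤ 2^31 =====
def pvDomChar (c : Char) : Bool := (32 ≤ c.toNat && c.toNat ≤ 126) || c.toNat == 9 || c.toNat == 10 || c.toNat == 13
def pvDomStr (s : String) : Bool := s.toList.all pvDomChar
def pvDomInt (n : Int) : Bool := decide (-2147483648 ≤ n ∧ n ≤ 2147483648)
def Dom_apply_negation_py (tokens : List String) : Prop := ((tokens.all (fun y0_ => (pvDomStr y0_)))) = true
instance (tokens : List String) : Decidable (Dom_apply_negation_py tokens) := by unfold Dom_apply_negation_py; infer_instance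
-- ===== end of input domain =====

-- B replaces A's carried negate_next flag by a lookahead loop consuming negation+next as a pair; alternative decomposition, same O(n) cost.

-- ===== PORT A =====
def pvNegations : List String :=
  ["not", "no", "never", "neither", "nor",
   "nobody", "nothing", "nowhere",
   "hardly", "scarcely", "barely",
   "cannot"]

-- the for loop of A, with the carried flag negate_next as explicit state
def pvGoA (negate_next : Bool) : List String → List String
  | [] => []
  | tok :: ts =>
    if negate_next && !(tok == "<url>" || tok == "<user>") then
      ("not_" ++ tok) :: pvGoA false ts
    else if pvNegations.contains tok then
      tok :: pvGoA true ts
    else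
      tok :: pvGoA false ts

def apply_negation_py (tokens : List String) : List String := pvGoA false tokens

-- ===== PORT B =====
-- index loop with lookahead: consume a negation and its follower as a pair, else one token
def apply_negation_py_alt : List String → List String
  | [] => []
  | [t] => [t]
  | t :: u :: ts =>
    if pvNegations.contains t && !(u == "<url>" || u == "<user>") then
      t :: ("not_" ++ u) :: apply_negation_py_alt ts
    else
      t :: apply_negation_py_alt (u :: ts)

-- ===== PRECONDITION & SPEC =====
def Spec_apply_negation_py (tokens : List String) (out : List String) : Prop := out = apply_negation_py_alt tokens
instance (tokens : List String) (out : List String) : Decidable (Spec_apply_negation_py tokens out) := by unfold Spec_apply_negation_py; infer_instance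

-- ===== CLAIM (what is proved, stated in full; the proofs are below) =====
def Claim_equal_apply_negation_py : Prop := ∀ (tokens : List String), Dom_apply_negation_py tokens → Spec_apply_negation_py tokens (apply_negation_py tokens)

-- ===== LEMMAS AND PROOFS =====

theorem pvGoA_false_eq_alt : ∀ (ts : List String), pvGoA false ts = apply_negation_py_alt ts := by
  intro ts
  induction ts using apply_negation_py_alt.induct with
  | case1 => rfl
  | case2 t => simp [pvGoA, apply_negation_py_alt]
  | case3 t u ts hcond ih =>
      have ht := (Bool.and_eq_true _ _ |>.mp hcond).1
      have hph := (Bool.and_eq_true _ _ |>.mp hcond).2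
      simp at ht hph
      simp [pvGoA, apply_negation_py_alt, ht, hph, ih]
  | case4 t u ts hcond ih =>
      by_cases ht : pvNegations.contains t = true
      · have hph : (u == "<url>" || u == "<user>") = true := by
          cases h : (u == "<url>" || u == "<user>") with
          | true => rfl
          | false => exact absurd (by simp [h]; simpa using ht) hcond
        have hu : u ∉ pvNegations := by
          rcases Bool.or_eq_true_iff.mp hph with h | h <;>
            · have := eq_of_beq h; subst this; decide
        have ht' : t ∈ pvNegations := by simpa using ht
        have hph' : u = "<url>" ∨ u = "<user>" := by simpa using hph
        have hB : apply_negation_py_alt (t :: u :: ts) = t :: apply_negation_py_alt (u :: ts) := by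
          simp [apply_negation_py_alt, hph]
        rw [hB, ← ih]
        rcases hph' with h | h <;> subst h <;> simp [pvGoA, ht', hu]
      · have ht' : t ∉ pvNegations := by simpa using ht
        have hB : apply_negation_py_alt (t :: u :: ts) = t :: apply_negation_py_alt (u :: ts) := by
          simp [apply_negation_py_alt, ht']
        rw [hB, ← ih]
        simp [pvGoA, ht']

-- ===== VERDICT (by name: the statement is the Claim_ definition above) =====
theorem apply_negation_py_spec : Claim_equal_apply_negation_py := by
  intro tokens _
  unfold Spec_apply_negation_py apply_negation_py
  exact pvGoA_false_eq_alt tokens
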